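-- pv_equiv track=rewrite | github.com/OzYossarian/Kandel | tests/codes/tic_tac_toe/test_GaugeFloquetColourCode.py | count_letter_with_skip
-- ===== SOURCE A (Python) =====
-- def count_letter_with_skip(list_of_letters, letter):
--     count = 0
--     skip_next = True
--     matched = False
--
--     for l in list_of_letters:
--         if l == letter:
--             if not skip_next:
--                 count += 1
--             matched = True
--
--         else:
--             if matched == True:
--                 skip_next = not skip_next
--
--             matched = False
--     return count
-- ===== SOURCE B (Python) =====
-- def count_letter_with_skip(list_of_letters, letter):
--     # Phase 1: run-length encode the positions equal to `letter`
--     # (consecutive matches form one run; non-matches only break runs).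
--     runs = []
--     prev = False
--     for x in list_of_letters:
--         cur = (x == letter)
--         if cur:
--             if prev:
--                 runs[-1] += 1
--             else:
--                 runs.append(1)
--         prev = cur
--     # Phase 2: the first run is skipped and runs alternate, so only
--     # odd-indexed runs are counted, each in full.
--     return sum(n for i, n in enumerate(runs) if i % 2 == 1)
-- ===== Notes on version B (the rewrite author's own statement) =====
-- stated objective: alternative
-- what changed: Replaced the per-element skip_next/matched state machine by a two-phase pass: run-length encode consecutive matches of the letter, then sum the odd-indexed runs (run 0 is skipped and runs alternate).
import Mathlib
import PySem

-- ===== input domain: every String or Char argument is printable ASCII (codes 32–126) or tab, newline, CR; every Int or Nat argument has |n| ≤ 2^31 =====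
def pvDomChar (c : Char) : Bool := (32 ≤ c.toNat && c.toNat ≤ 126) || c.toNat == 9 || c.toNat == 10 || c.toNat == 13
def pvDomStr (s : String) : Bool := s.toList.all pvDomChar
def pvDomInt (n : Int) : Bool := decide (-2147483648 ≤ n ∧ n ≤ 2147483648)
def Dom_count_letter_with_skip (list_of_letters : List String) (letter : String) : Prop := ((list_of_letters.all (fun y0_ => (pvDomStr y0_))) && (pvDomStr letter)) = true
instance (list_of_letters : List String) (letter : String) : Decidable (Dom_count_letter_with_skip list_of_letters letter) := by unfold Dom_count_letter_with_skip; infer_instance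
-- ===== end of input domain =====

-- B re-implements A's per-element skip state machine as run-length encoding followed
-- by summing the odd-indexed runs (alternative decomposition, same O(n) cost).

-- ===== PORT A =====
-- loop body; state: (count, skip_next, matched)
def pvStepA (letter : String) (st : Int × Bool × Bool) (l : String) : Int × Bool × Bool :=
  if l == letter then
    (if !st.2.1 then st.1 + 1 else st.1, st.2.1, true)
  else
    (st.1, if st.2.2 then !st.2.1 else st.2.1, false)

def count_letter_with_skip (list_of_letters : List String) (letter : String) : Int :=
  (list_of_letters.foldl (pvStepA letter) (0, true, false)).1

-- ===== PORT B =====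
-- runs[-1] += 1
def pvIncLast : List Int → List Int
  | [] => []
  | [a] => [a + 1]
  | a :: b :: t => a :: pvIncLast (b :: t)

-- phase-1 loop body; state: (runs, prev)
def pvStepB (letter : String) (st : List Int × Bool) (x : String) : List Int × Bool :=
  let cur := x == letter
  (if cur then (if st.2 then pvIncLast st.1 else st.1 ++ [1]) else st.1, cur)

def count_letter_with_skip_alt (list_of_letters : List String) (letter : String) : Int :=
  let s := list_of_letters.foldl (pvStepB letter) ([], false)
  -- sum(n for i, n in enumerate(runs) if i % 2 == 1)
  (PySem.List.enumerate s.1).foldl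
    (fun acc p => if PySem.Int.mod p.1 2 == 1 then acc + p.2 else acc) 0

-- ===== PRECONDITION & SPEC =====
def Spec_count_letter_with_skip (list_of_letters : List String) (letter : String) (out : Int) : Prop := out = count_letter_with_skip_alt list_of_letters letter
instance (list_of_letters : List String) (letter : String) (out : Int) : Decidable (Spec_count_letter_with_skip list_of_letters letter out) := by unfold Spec_count_letter_with_skip; infer_instance

-- ===== CLAIM (what is proved, stated in full; the proofs are below) =====
def Claim_equal_count_letter_with_skip : Prop := ∀ (list_of_letters : List String) (letter : String), Dom_count_letter_with_skip list_of_letters letter → Spec_count_letter_with_skip list_of_letters letter (count_letter_with_skip list_of_letters letter)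

-- ===== LEMMAS AND PROOFS =====

-- sum of elements whose alternating flag (starting at p) is true
def pvSumPar (p : Bool) : List Int → Int
  | [] => 0
  | a :: t => (if p then a else 0) + pvSumPar (!p) t

lemma pvIncLast_length : ∀ rs : List Int, (pvIncLast rs).length = rs.length
  | [] => rfl
  | [_] => rfl
  | _ :: b :: t => by simp [pvIncLast, pvIncLast_length (b :: t)]

lemma pvIncLast_ne_nil (rs : List Int) (h : rs ≠ []) : pvIncLast rs ≠ [] := by
  cases rs with
  | nil => exact absurd rfl h
  | cons a t => cases t <;> simp [pvIncLast]

lemma pvSumPar_append : ∀ (rs : List Int) (p : Bool) (c : Int),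
    pvSumPar p (rs ++ [c]) = pvSumPar p rs + (if (if rs.length % 2 = 0 then p else !p) then c else 0)
  | [], p, c => by simp [pvSumPar]
  | a :: t, p, c => by
    have ih := pvSumPar_append t (!p) c
    simp only [List.cons_append, pvSumPar, ih, List.length_cons]
    have h : (t.length + 1) % 2 = 0 ↔ ¬ (t.length % 2 = 0) := by omega
    by_cases hp : t.length % 2 = 0 <;> cases p <;> simp [hp, h] <;> ring

lemma pvSumPar_incLast : ∀ (rs : List Int) (p : Bool), rs ≠ [] →
    pvSumPar p (pvIncLast rs) = pvSumPar p rs + (if (if (rs.length - 1) % 2 = 0 then p else !p) then 1 else 0)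
  | [], _, h => absurd rfl h
  | [a], p, _ => by cases p <;> simp [pvIncLast, pvSumPar]
  | a :: b :: t, p, _ => by
    have ih := pvSumPar_incLast (b :: t) (!p) (by simp)
    simp only [pvIncLast, pvSumPar, ih, List.length_cons]
    by_cases hp : t.length % 2 = 0
    · have e0 : ¬ t.length % 2 = 1 := by omega
      have e1 : (1 + t.length) % 2 = 1 := by omega
      have e2 : (t.length + 1 - 1) % 2 = 0 := by omega
      have e3 : ¬ (t.length + 1 + 1 - 1) % 2 = 0 := by omega
      cases p <;> simp [hp, e0, e1, e2, e3] <;>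
        (try split_ifs) <;> (try omega) <;> ring
    · have e0 : t.length % 2 = 1 := by omega
      have e1 : (1 + t.length) % 2 = 0 := by omega
      have e2 : ¬ (t.length + 1 - 1) % 2 = 0 := by omega
      have e3 : (t.length + 1 + 1 - 1) % 2 = 0 := by omega
      cases p <;> simp [hp, e0, e1, e2, e3] <;>
        (try split_ifs) <;> (try omega) <;> ring

-- the enumerate-filter-sum of B's phase 2 computes pvSumPar
lemma pvEnumFold : ∀ (rs : List Int) (s : Int) (acc : Int), 0 ≤ s →
    (PySem.List.enumerate rs s).foldl
      (fun acc p => if PySem.Int.mod p.1 2 == 1 then acc + p.2 else acc) acc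
    = acc + pvSumPar (PySem.Int.mod s 2 == 1) rs
  | [], s, acc, _ => by simp [PySem.List.enumerate_nil, pvSumPar]
  | a :: t, s, acc, hs => by
    have hrec := pvEnumFold t (s + 1) (if PySem.Int.mod s 2 == 1 then acc + a else acc) (by omega)
    have hm : PySem.Int.mod s 2 = s % 2 := PySem.Int.mod_eq_emod_of_pos (by norm_num)
    have hm1 : PySem.Int.mod (s + 1) 2 = (s + 1) % 2 := PySem.Int.mod_eq_emod_of_pos (by norm_num)
    rw [PySem.List.enumerate_cons, List.foldl_cons]
    show List.foldl _ (if PySem.Int.mod s 2 == 1 then acc + a else acc) _ = _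
    rw [hrec, pvSumPar, hm, hm1]
    have h2 : s % 2 = 0 ∨ s % 2 = 1 := by omega
    rcases h2 with h | h
    · have h1 : (s + 1) % 2 = 1 := by omega
      simp [h, h1]
    · have h1 : (s + 1) % 2 = 0 := by omega
      simp [h, h1]; ring

-- the main invariant: A's running count equals the odd-run sum of B's runs built so far
lemma pvMain (letter : String) : ∀ (L : List String) (count : Int) (skip prev : Bool) (runs : List Int),
    (prev = true → runs ≠ []) →
    skip = decide ((runs.length - (if prev then 1 else 0)) % 2 = 0) →
    count = pvSumPar false runs →
    (L.foldl (pvStepA letter) (count, skip, prev)).1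
    = pvSumPar false (L.foldl (pvStepB letter) (runs, prev)).1
  | [], count, skip, prev, runs, _, _, hc => by simpa using hc
  | x :: L, count, skip, prev, runs, hne, hs, hc => by
    rw [List.foldl_cons, List.foldl_cons]
    by_cases hx : (x == letter) = true
    · cases prev with
      | true =>
        have hr := hne rfl
        have hA : pvStepA letter (count, skip, true) x
            = (if !skip then count + 1 else count, skip, true) := by simp [pvStepA, hx]
        have hB : pvStepB letter (runs, true) x = (pvIncLast runs, true) := by
          simp [pvStepB, hx]
        rw [hA, hB]
        refine pvMain letter L _ _ _ _ (fun _ => pvIncLast_ne_nil runs hr) ?_ ?_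
        · rw [pvIncLast_length]; simpa using hs
        · rw [pvSumPar_incLast runs false hr, ← hc]
          have h0 : 0 < runs.length := List.length_pos_of_ne_nil hr
          subst hs
          by_cases hp : (runs.length - 1) % 2 = 0 <;> simp [hp]
      | false =>
        have hA : pvStepA letter (count, skip, false) x
            = (if !skip then count + 1 else count, skip, true) := by simp [pvStepA, hx]
        have hB : pvStepB letter (runs, false) x = (runs ++ [1], true) := by
          simp [pvStepB, hx]
        rw [hA, hB]
        refine pvMain letter L _ _ _ _ (fun _ => by simp) ?_ ?_
        · simp only [List.length_append, List.length_cons, List.length_nil]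
          simpa using hs
        · rw [pvSumPar_append runs false 1, ← hc]
          subst hs
          by_cases hp : runs.length % 2 = 0 <;> simp [hp]
    · cases prev with
      | true =>
        have hr := hne rfl
        have h0 : 0 < runs.length := List.length_pos_of_ne_nil hr
        have hA : pvStepA letter (count, skip, true) x = (count, !skip, false) := by
          simp [pvStepA, hx]
        have hB : pvStepB letter (runs, true) x = (runs, false) := by simp [pvStepB, hx]
        rw [hA, hB]
        refine pvMain letter L _ _ _ _ (by simp) ?_ hc
        · subst hs
          have h : (runs.length - 1) % 2 = 0 ↔ ¬ (runs.length % 2 = 0) := by omega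
          by_cases hp : runs.length % 2 = 0 <;> simp [hp, h]
      | false =>
        have hA : pvStepA letter (count, skip, false) x = (count, skip, false) := by
          simp [pvStepA, hx]
        have hB : pvStepB letter (runs, false) x = (runs, false) := by simp [pvStepB, hx]
        rw [hA, hB]
        exact pvMain letter L _ _ _ _ (by simp) (by simpa using hs) hc

-- ===== VERDICT (by name: the statement is the Claim_ definition above) =====
theorem count_letter_with_skip_spec : Claim_equal_count_letter_with_skip := by
  intro L letter _
  unfold Spec_count_letter_with_skip count_letter_with_skip count_letter_with_skip_alt
  rw [pvEnumFold _ 0 0 le_rfl]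
  have := pvMain letter L 0 true false [] (by simp) (by simp) (by simp [pvSumPar])
  simpa [PySem.Int.mod] using this
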